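-- pv_equiv track=rewrite | github.com/simonwchan/Risk_R2 | map_data.py | calculate_reinforcements
-- ===== SOURCE A (Python) =====
-- CONTINENTS = {
--     "North America": {
--         "bonus": 5,
--         "color": "#2E86AB",
--         "territories": [
--             "Alaska", "Yukon", "Northwest Canada", "Ontario", "Quebec",
--             "British Columbia", "Alberta", "Great Plains", "Great Lakes",
--             "New England", "California", "Southwest USA", "Southeast USA",
--             "Texas", "Mexico North", "Mexico South", "Central America", "Caribbean"
--         ]
--     },
--     "South America": {
--         "bonus": 4,
--         "color": "#A23B72",
--         "territories": [
--             "Colombia", "Venezuela", "Guyana", "Ecuador", "Peru",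
--             "Brazil North", "Brazil Central", "Brazil South", "Bolivia",
--             "Paraguay", "Chile North", "Chile South", "Argentina North", "Argentina South", "Uruguay"
--         ]
--     },
--     "Europe": {
--         "bonus": 5,
--         "color": "#F18F01",
--         "territories": [
--             "Iceland", "Scotland", "Ireland", "England", "Scandinavia",
--             "Finland", "Baltic States", "Poland", "Germany", "Netherlands",
--             "France", "Iberia", "Italy", "Austria", "Balkans",
--             "Ukraine West", "Romania", "Greece", "Turkey"
--         ]
--     },
--     "Africa": {
--         "bonus": 4,
--         "color": "#C73E1D",
--         "territories": [
--             "Morocco", "Algeria", "Libya", "Egypt", "West Africa",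
--             "Mali", "Sudan", "Ethiopia", "Nigeria", "Congo",
--             "Tanzania", "Angola", "Mozambique", "Zimbabwe", "Botswana",
--             "South Africa", "Madagascar"
--         ]
--     },
--     "Middle East & Central Asia": {
--         "bonus": 4,
--         "color": "#D4A017",
--         "territories": [
--             "Turkey East", "Lebanon Syria", "Israel Jordan", "Iraq", "Iran West",
--             "Iran East", "Saudi Arabia", "Yemen", "Oman UAE", "Afghanistan",
--             "Pakistan", "Kazakhstan", "Uzbekistan", "Turkmenistan", "Kyrgyzstan"
--         ]
--     },
--     "Asia": {
--         "bonus": 7,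
--         "color": "#3B1F2B",
--         "territories": [
--             "Russia West", "Russia Central", "Russia East", "Siberia", "Russia Far East",
--             "India North", "India South", "India East", "Sri Lanka",
--             "China North", "China Central", "China South", "China East", "Tibet",
--             "Mongolia", "Manchuria", "Korea", "Japan North", "Japan South",
--             "Taiwan", "Vietnam", "Thailand", "Myanmar", "Laos Cambodia",
--             "Malaysia", "Philippines", "Indonesia West", "Indonesia East"
--         ]
--     },
--     "Oceania": {
--         "bonus": 3,
--         "color": "#44BBA4",
--         "territories": [
--             "Western Australia", "Northern Territory", "Queensland",
--             "New South Wales", "Victoria", "South Australia",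
--             "New Zealand North", "New Zealand South",
--             "Papua New Guinea", "Melanesia", "Polynesia"
--         ]
--     }
-- }
--
-- def calculate_reinforcements(territories_owned):
--     """Calculate how many troops a player gets per turn."""
--     base = max(3, len(territories_owned) // 3)
--     bonus = 0
--     owned_set = set(territories_owned)
--     for continent, data in CONTINENTS.items():
--         if all(t in owned_set for t in data["territories"]):
--             bonus += data["bonus"]
--     return base + bonus
-- ===== SOURCE B (Python) =====
-- # Reverse index: territory -> continent, plus per-continent (size, bonus) table.
-- TERRITORY_TO_CONTINENT = {
--     'Alaska': 'North America',
--     'Yukon': 'North America',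
--     'Northwest Canada': 'North America',
--     'Ontario': 'North America',
--     'Quebec': 'North America',
--     'British Columbia': 'North America',
--     'Alberta': 'North America',
--     'Great Plains': 'North America',
--     'Great Lakes': 'North America',
--     'New England': 'North America',
--     'California': 'North America',
--     'Southwest USA': 'North America',
--     'Southeast USA': 'North America',
--     'Texas': 'North America',
--     'Mexico North': 'North America',
--     'Mexico South': 'North America',
--     'Central America': 'North America',
--     'Caribbean': 'North America',
--     'Colombia': 'South America',
--     'Venezuela': 'South America',
--     'Guyana': 'South America',
--     'Ecuador': 'South America',
--     'Peru': 'South America',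
--     'Brazil North': 'South America',
--     'Brazil Central': 'South America',
--     'Brazil South': 'South America',
--     'Bolivia': 'South America',
--     'Paraguay': 'South America',
--     'Chile North': 'South America',
--     'Chile South': 'South America',
--     'Argentina North': 'South America',
--     'Argentina South': 'South America',
--     'Uruguay': 'South America',
--     'Iceland': 'Europe',
--     'Scotland': 'Europe',
--     'Ireland': 'Europe',
--     'England': 'Europe',
--     'Scandinavia': 'Europe',
--     'Finland': 'Europe',
--     'Baltic States': 'Europe',
--     'Poland': 'Europe',
--     'Germany': 'Europe',
--     'Netherlands': 'Europe',
--     'France': 'Europe',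
--     'Iberia': 'Europe',
--     'Italy': 'Europe',
--     'Austria': 'Europe',
--     'Balkans': 'Europe',
--     'Ukraine West': 'Europe',
--     'Romania': 'Europe',
--     'Greece': 'Europe',
--     'Turkey': 'Europe',
--     'Morocco': 'Africa',
--     'Algeria': 'Africa',
--     'Libya': 'Africa',
--     'Egypt': 'Africa',
--     'West Africa': 'Africa',
--     'Mali': 'Africa',
--     'Sudan': 'Africa',
--     'Ethiopia': 'Africa',
--     'Nigeria': 'Africa',
--     'Congo': 'Africa',
--     'Tanzania': 'Africa',
--     'Angola': 'Africa',
--     'Mozambique': 'Africa',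
--     'Zimbabwe': 'Africa',
--     'Botswana': 'Africa',
--     'South Africa': 'Africa',
--     'Madagascar': 'Africa',
--     'Turkey East': 'Middle East & Central Asia',
--     'Lebanon Syria': 'Middle East & Central Asia',
--     'Israel Jordan': 'Middle East & Central Asia',
--     'Iraq': 'Middle East & Central Asia',
--     'Iran West': 'Middle East & Central Asia',
--     'Iran East': 'Middle East & Central Asia',
--     'Saudi Arabia': 'Middle East & Central Asia',
--     'Yemen': 'Middle East & Central Asia',
--     'Oman UAE': 'Middle East & Central Asia',
--     'Afghanistan': 'Middle East & Central Asia',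
--     'Pakistan': 'Middle East & Central Asia',
--     'Kazakhstan': 'Middle East & Central Asia',
--     'Uzbekistan': 'Middle East & Central Asia',
--     'Turkmenistan': 'Middle East & Central Asia',
--     'Kyrgyzstan': 'Middle East & Central Asia',
--     'Russia West': 'Asia',
--     'Russia Central': 'Asia',
--     'Russia East': 'Asia',
--     'Siberia': 'Asia',
--     'Russia Far East': 'Asia',
--     'India North': 'Asia',
--     'India South': 'Asia',
--     'India East': 'Asia',
--     'Sri Lanka': 'Asia',
--     'China North': 'Asia',
--     'China Central': 'Asia',
--     'China South': 'Asia',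
--     'China East': 'Asia',
--     'Tibet': 'Asia',
--     'Mongolia': 'Asia',
--     'Manchuria': 'Asia',
--     'Korea': 'Asia',
--     'Japan North': 'Asia',
--     'Japan South': 'Asia',
--     'Taiwan': 'Asia',
--     'Vietnam': 'Asia',
--     'Thailand': 'Asia',
--     'Myanmar': 'Asia',
--     'Laos Cambodia': 'Asia',
--     'Malaysia': 'Asia',
--     'Philippines': 'Asia',
--     'Indonesia West': 'Asia',
--     'Indonesia East': 'Asia',
--     'Western Australia': 'Oceania',
--     'Northern Territory': 'Oceania',
--     'Queensland': 'Oceania',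
--     'New South Wales': 'Oceania',
--     'Victoria': 'Oceania',
--     'South Australia': 'Oceania',
--     'New Zealand North': 'Oceania',
--     'New Zealand South': 'Oceania',
--     'Papua New Guinea': 'Oceania',
--     'Melanesia': 'Oceania',
--     'Polynesia': 'Oceania',
-- }
--
-- CONTINENT_INFO = {
--     'North America': (18, 5),
--     'South America': (15, 4),
--     'Europe': (19, 5),
--     'Africa': (17, 4),
--     'Middle East & Central Asia': (15, 4),
--     'Asia': (28, 7),
--     'Oceania': (11, 3),
-- }
--
--
-- def calculate_reinforcements(territories_owned):
--     """Calculate how many troops a player gets per turn."""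
--     owned = set(territories_owned)
--     total = max(3, len(territories_owned) // 3)
--     for cont, (size, bonus) in CONTINENT_INFO.items():
--         if sum(1 for t in owned if TERRITORY_TO_CONTINENT.get(t) == cont) == size:
--             total += bonus
--     return total
-- ===== Notes on version B (the rewrite author's own statement) =====
-- stated objective: alternative
-- what changed: Replaces A's per-continent all(t in owned_set) subset tests with a prebuilt territory-to-continent reverse index plus a per-continent (size, bonus) table: for each continent B counts the owned territories whose index entry is that continent and grants the bonus when the count reaches the continent's size, accumulating directly into the base total.
import Mathlib
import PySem

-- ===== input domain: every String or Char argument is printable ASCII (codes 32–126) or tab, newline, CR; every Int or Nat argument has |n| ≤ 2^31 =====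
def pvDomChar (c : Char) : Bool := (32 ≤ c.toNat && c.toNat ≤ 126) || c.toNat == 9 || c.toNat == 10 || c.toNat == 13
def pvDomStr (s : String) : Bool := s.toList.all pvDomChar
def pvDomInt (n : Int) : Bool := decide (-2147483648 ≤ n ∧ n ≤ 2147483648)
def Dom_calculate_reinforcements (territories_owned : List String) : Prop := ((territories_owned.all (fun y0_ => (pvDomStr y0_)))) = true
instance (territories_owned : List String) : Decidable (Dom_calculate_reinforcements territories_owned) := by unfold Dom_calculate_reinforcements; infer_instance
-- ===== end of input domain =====

-- ===== PORT A =====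
-- B replaces A's per-continent subset tests over the owned set with a territory->continent
-- reverse index and a per-continent count over the owned set (objective: alternative; same result).
def pvContinents : List (String × Int × List String) := [
  ("North America", 5, ["Alaska", "Yukon", "Northwest Canada", "Ontario", "Quebec", "British Columbia", "Alberta", "Great Plains", "Great Lakes", "New England", "California", "Southwest USA", "Southeast USA", "Texas", "Mexico North", "Mexico South", "Central America", "Caribbean"]),
  ("South America", 4, ["Colombia", "Venezuela", "Guyana", "Ecuador", "Peru", "Brazil North", "Brazil Central", "Brazil South", "Bolivia", "Paraguay", "Chile North", "Chile South", "Argentina North", "Argentina South", "Uruguay"]),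
  ("Europe", 5, ["Iceland", "Scotland", "Ireland", "England", "Scandinavia", "Finland", "Baltic States", "Poland", "Germany", "Netherlands", "France", "Iberia", "Italy", "Austria", "Balkans", "Ukraine West", "Romania", "Greece", "Turkey"]),
  ("Africa", 4, ["Morocco", "Algeria", "Libya", "Egypt", "West Africa", "Mali", "Sudan", "Ethiopia", "Nigeria", "Congo", "Tanzania", "Angola", "Mozambique", "Zimbabwe", "Botswana", "South Africa", "Madagascar"]),
  ("Middle East & Central Asia", 4, ["Turkey East", "Lebanon Syria", "Israel Jordan", "Iraq", "Iran West", "Iran East", "Saudi Arabia", "Yemen", "Oman UAE", "Afghanistan", "Pakistan", "Kazakhstan", "Uzbekistan", "Turkmenistan", "Kyrgyzstan"]),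
  ("Asia", 7, ["Russia West", "Russia Central", "Russia East", "Siberia", "Russia Far East", "India North", "India South", "India East", "Sri Lanka", "China North", "China Central", "China South", "China East", "Tibet", "Mongolia", "Manchuria", "Korea", "Japan North", "Japan South", "Taiwan", "Vietnam", "Thailand", "Myanmar", "Laos Cambodia", "Malaysia", "Philippines", "Indonesia West", "Indonesia East"]),
  ("Oceania", 3, ["Western Australia", "Northern Territory", "Queensland", "New South Wales", "Victoria", "South Australia", "New Zealand North", "New Zealand South", "Papua New Guinea", "Melanesia", "Polynesia"])
]
def calculate_reinforcements (territories_owned : List String) : Int :=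
  let base := max 3 (PySem.Int.floordiv ((territories_owned.length : Int)) 3)
  let owned_set := PySem.Set.ofList territories_owned
  let bonus := pvContinents.foldl
    (fun bonus c => if c.2.2.all (fun t => PySem.Set.contains owned_set t) then bonus + c.2.1 else bonus) 0
  base + bonus

-- ===== PORT B =====
def pvRev : PySem.Dict String String := PySem.Dict.ofList [
  ("Alaska", "North America"),
  ("Yukon", "North America"),
  ("Northwest Canada", "North America"),
  ("Ontario", "North America"),
  ("Quebec", "North America"),
  ("British Columbia", "North America"),
  ("Alberta", "North America"),
  ("Great Plains", "North America"),
  ("Great Lakes", "North America"),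
  ("New England", "North America"),
  ("California", "North America"),
  ("Southwest USA", "North America"),
  ("Southeast USA", "North America"),
  ("Texas", "North America"),
  ("Mexico North", "North America"),
  ("Mexico South", "North America"),
  ("Central America", "North America"),
  ("Caribbean", "North America"),
  ("Colombia", "South America"),
  ("Venezuela", "South America"),
  ("Guyana", "South America"),
  ("Ecuador", "South America"),
  ("Peru", "South America"),
  ("Brazil North", "South America"),
  ("Brazil Central", "South America"),
  ("Brazil South", "South America"),
  ("Bolivia", "South America"),
  ("Paraguay", "South America"),
  ("Chile North", "South America"),
  ("Chile South", "South America"),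
  ("Argentina North", "South America"),
  ("Argentina South", "South America"),
  ("Uruguay", "South America"),
  ("Iceland", "Europe"),
  ("Scotland", "Europe"),
  ("Ireland", "Europe"),
  ("England", "Europe"),
  ("Scandinavia", "Europe"),
  ("Finland", "Europe"),
  ("Baltic States", "Europe"),
  ("Poland", "Europe"),
  ("Germany", "Europe"),
  ("Netherlands", "Europe"),
  ("France", "Europe"),
  ("Iberia", "Europe"),
  ("Italy", "Europe"),
  ("Austria", "Europe"),
  ("Balkans", "Europe"),
  ("Ukraine West", "Europe"),
  ("Romania", "Europe"),
  ("Greece", "Europe"),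
  ("Turkey", "Europe"),
  ("Morocco", "Africa"),
  ("Algeria", "Africa"),
  ("Libya", "Africa"),
  ("Egypt", "Africa"),
  ("West Africa", "Africa"),
  ("Mali", "Africa"),
  ("Sudan", "Africa"),
  ("Ethiopia", "Africa"),
  ("Nigeria", "Africa"),
  ("Congo", "Africa"),
  ("Tanzania", "Africa"),
  ("Angola", "Africa"),
  ("Mozambique", "Africa"),
  ("Zimbabwe", "Africa"),
  ("Botswana", "Africa"),
  ("South Africa", "Africa"),
  ("Madagascar", "Africa"),
  ("Turkey East", "Middle East & Central Asia"),
  ("Lebanon Syria", "Middle East & Central Asia"),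
  ("Israel Jordan", "Middle East & Central Asia"),
  ("Iraq", "Middle East & Central Asia"),
  ("Iran West", "Middle East & Central Asia"),
  ("Iran East", "Middle East & Central Asia"),
  ("Saudi Arabia", "Middle East & Central Asia"),
  ("Yemen", "Middle East & Central Asia"),
  ("Oman UAE", "Middle East & Central Asia"),
  ("Afghanistan", "Middle East & Central Asia"),
  ("Pakistan", "Middle East & Central Asia"),
  ("Kazakhstan", "Middle East & Central Asia"),
  ("Uzbekistan", "Middle East & Central Asia"),
  ("Turkmenistan", "Middle East & Central Asia"),
  ("Kyrgyzstan", "Middle East & Central Asia"),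
  ("Russia West", "Asia"),
  ("Russia Central", "Asia"),
  ("Russia East", "Asia"),
  ("Siberia", "Asia"),
  ("Russia Far East", "Asia"),
  ("India North", "Asia"),
  ("India South", "Asia"),
  ("India East", "Asia"),
  ("Sri Lanka", "Asia"),
  ("China North", "Asia"),
  ("China Central", "Asia"),
  ("China South", "Asia"),
  ("China East", "Asia"),
  ("Tibet", "Asia"),
  ("Mongolia", "Asia"),
  ("Manchuria", "Asia"),
  ("Korea", "Asia"),
  ("Japan North", "Asia"),
  ("Japan South", "Asia"),
  ("Taiwan", "Asia"),
  ("Vietnam", "Asia"),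
  ("Thailand", "Asia"),
  ("Myanmar", "Asia"),
  ("Laos Cambodia", "Asia"),
  ("Malaysia", "Asia"),
  ("Philippines", "Asia"),
  ("Indonesia West", "Asia"),
  ("Indonesia East", "Asia"),
  ("Western Australia", "Oceania"),
  ("Northern Territory", "Oceania"),
  ("Queensland", "Oceania"),
  ("New South Wales", "Oceania"),
  ("Victoria", "Oceania"),
  ("South Australia", "Oceania"),
  ("New Zealand North", "Oceania"),
  ("New Zealand South", "Oceania"),
  ("Papua New Guinea", "Oceania"),
  ("Melanesia", "Oceania"),
  ("Polynesia", "Oceania")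
]

def pvInfo : List (String × Int × Int) := [
  ("North America", 18, 5),
  ("South America", 15, 4),
  ("Europe", 19, 5),
  ("Africa", 17, 4),
  ("Middle East & Central Asia", 15, 4),
  ("Asia", 28, 7),
  ("Oceania", 11, 3)
]
-- max(3, len(xs) // 3): the length is a Nat, so Python's // 3 is Nat division here (exact)
def calculate_reinforcements_alt (territories_owned : List String) : Int :=
  let owned := PySem.Set.ofList territories_owned
  pvInfo.foldl
    (fun total c =>
      if ((owned.countP (fun t => pvRev.get? t == some c.1) : Int)) == c.2.1 then total + c.2.2
      else total)
    ((max 3 (territories_owned.length / 3) : Nat) : Int)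

-- ===== PRECONDITION & SPEC =====
def Spec_calculate_reinforcements (territories_owned : List String) (out : Int) : Prop := out = calculate_reinforcements_alt territories_owned
instance (territories_owned : List String) (out : Int) : Decidable (Spec_calculate_reinforcements territories_owned out) := by unfold Spec_calculate_reinforcements; infer_instance

-- ===== CLAIM (what is proved, stated in full; the proofs are below) =====
def Claim_equal_calculate_reinforcements : Prop := ∀ (territories_owned : List String), Dom_calculate_reinforcements territories_owned → Spec_calculate_reinforcements territories_owned (calculate_reinforcements territories_owned)

-- ===== LEMMAS AND PROOFS =====

theorem pvRev_keys_nodup : pvRev.keys.Nodup := PySem.Dict.nodup_keys_ofList _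

-- the two base computations agree (length >= 0, so floor division is Nat division)
theorem base_eq (n : Nat) :
    max 3 (PySem.Int.floordiv ((n : Int)) 3) = ((max 3 (n / 3) : Nat) : Int) := by
  have h : PySem.Int.floordiv ((n : Int)) 3 = ((n / 3 : Nat) : Int) := by
    exact_mod_cast PySem.Int.floordiv_natCast n 3
  rw [h, Nat.cast_max]
  norm_num

-- pull a starting value out of a conditional-accumulation fold
theorem foldl_if_add_shift {α : Type} (l : List α) (p : α → Bool) (v : α → Int) (b : Int) :
    l.foldl (fun a c => if p c then a + v c else a) b
      = b + l.foldl (fun a c => if p c then a + v c else a) 0 := by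
  induction l generalizing b with
  | nil => simp
  | cons c l ih =>
    simp only [List.foldl_cons]
    rw [ih, ih (if p c then 0 + v c else 0)]
    by_cases h : p c = true <;> simp [h] <;> ring

-- pvRev.get? hits `name` exactly on the territories of the continent `name`,
-- reduced to two finite checks over the literal index
theorem pvRev_get?_iff (name : String) (ts : List String)
    (h1 : ∀ p ∈ pvRev.items, p.2 = name → p.1 ∈ ts)
    (h2 : ∀ u ∈ ts, (u, name) ∈ pvRev.items)
    (t : String) : pvRev.get? t = some name ↔ t ∈ ts := by
  rw [PySem.Dict.get?_eq_some_iff_mem_items pvRev t name pvRev_keys_nodup]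
  exact ⟨fun h => h1 _ h rfl, fun h => h2 _ h⟩

-- |{t in S : t in ts}| = |ts|  iff  ts ⊆ S, for S and ts without duplicates
theorem count_eq_length_iff (S ts : List String) (hS : S.Nodup) (hts : ts.Nodup) :
    (S.countP (fun t => decide (t ∈ ts)) = ts.length) ↔ ∀ u ∈ ts, u ∈ S := by
  rw [List.countP_eq_length_filter]
  constructor
  · intro hlen u hu
    have hsub : S.filter (fun t => decide (t ∈ ts)) ⊆ ts := by
      intro x hx
      simpa using (List.of_mem_filter hx)
    have hperm := ((hS.filter _).subperm hsub).perm_of_length_le (le_of_eq hlen.symm)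
    have : u ∈ S.filter (fun t => decide (t ∈ ts)) := hperm.mem_iff.mpr hu
    exact (List.mem_filter.mp this).1
  · intro hsub
    have h1 : ts ⊆ S.filter (fun t => decide (t ∈ ts)) := by
      intro x hx
      exact List.mem_filter.mpr ⟨hsub x hx, by simpa using hx⟩
    have h2 : S.filter (fun t => decide (t ∈ ts)) ⊆ ts := by
      intro x hx
      simpa using (List.of_mem_filter hx)
    exact le_antisymm (((hS.filter _).subperm h2).length_le) ((hts.subperm h1).length_le)

-- the two per-continent conditions agree, for any continent of the table
theorem cond_eq (xs : List String) (name : String) (ts : List String) (n : Int)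
    (hts : ts.Nodup) (hn : (ts.length : Int) = n)
    (h1 : ∀ p ∈ pvRev.items, p.2 = name → p.1 ∈ ts)
    (h2 : ∀ u ∈ ts, (u, name) ∈ pvRev.items) :
    (ts.all (fun t => PySem.Set.contains (PySem.Set.ofList xs) t))
      = ((((PySem.Set.ofList xs).countP (fun t => pvRev.get? t == some name) : Int)) == n) := by
  subst hn
  have hcnt : (PySem.Set.ofList xs).countP (fun t => pvRev.get? t == some name)
      = (PySem.Set.ofList xs).countP (fun t => decide (t ∈ ts)) := by
    apply List.countP_congr
    intro t _
    simp [pvRev_get?_iff name ts h1 h2 t]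
  rw [hcnt]
  have hiff := count_eq_length_iff (PySem.Set.ofList xs) ts (PySem.Set.nodup_ofList xs) hts
  have hmem : ∀ u : String, PySem.Set.contains (PySem.Set.ofList xs) u = true ↔ u ∈ PySem.Set.ofList xs := by
    intro u; simp [PySem.Set.contains]
  rcases Bool.eq_false_or_eq_true (ts.all fun t => PySem.Set.contains (PySem.Set.ofList xs) t) with hA | hA <;> rw [hA]
  · have hall : ∀ u ∈ ts, u ∈ PySem.Set.ofList xs :=
      fun u hu => (hmem u).mp (List.all_eq_true.mp hA u hu)
    symm
    rw [beq_iff_eq]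
    exact_mod_cast hiff.mpr hall
  · have hA' : ¬ ∀ u ∈ ts, u ∈ PySem.Set.ofList xs := by
      intro hall
      have hT : (ts.all fun t => PySem.Set.contains (PySem.Set.ofList xs) t) = true :=
        List.all_eq_true.mpr (fun t ht => (hmem t).mpr (hall t ht))
      rw [hA] at hT
      exact Bool.false_ne_true hT
    symm
    rw [beq_eq_false_iff_ne]
    intro hc
    exact hA' (hiff.mp (by exact_mod_cast hc))

-- ===== VERDICT (by name: the statement is the Claim_ definition above) =====
set_option maxRecDepth 100000 in
set_option maxHeartbeats 4000000 in
theorem calculate_reinforcements_spec : Claim_equal_calculate_reinforcements := by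
  intro xs _
  unfold Spec_calculate_reinforcements calculate_reinforcements calculate_reinforcements_alt
  simp only []
  rw [foldl_if_add_shift pvInfo
        (fun c => ((((PySem.Set.ofList xs).countP (fun t => pvRev.get? t == some c.1) : Int)) == c.2.1))
        (fun c => c.2.2), base_eq]
  congr 1
  simp only [pvContinents, pvInfo, List.foldl_cons, List.foldl_nil]
  rw [cond_eq xs "North America" ["Alaska", "Yukon", "Northwest Canada", "Ontario", "Quebec", "British Columbia", "Alberta", "Great Plains", "Great Lakes", "New England", "California", "Southwest USA", "Southeast USA", "Texas", "Mexico North", "Mexico South", "Central America", "Caribbean"] 18 (by decide) (by norm_num) (by decide) (by decide)]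
  rw [cond_eq xs "South America" ["Colombia", "Venezuela", "Guyana", "Ecuador", "Peru", "Brazil North", "Brazil Central", "Brazil South", "Bolivia", "Paraguay", "Chile North", "Chile South", "Argentina North", "Argentina South", "Uruguay"] 15 (by decide) (by norm_num) (by decide) (by decide)]
  rw [cond_eq xs "Europe" ["Iceland", "Scotland", "Ireland", "England", "Scandinavia", "Finland", "Baltic States", "Poland", "Germany", "Netherlands", "France", "Iberia", "Italy", "Austria", "Balkans", "Ukraine West", "Romania", "Greece", "Turkey"] 19 (by decide) (by norm_num) (by decide) (by decide)]
  rw [cond_eq xs "Africa" ["Morocco", "Algeria", "Libya", "Egypt", "West Africa", "Mali", "Sudan", "Ethiopia", "Nigeria", "Congo", "Tanzania", "Angola", "Mozambique", "Zimbabwe", "Botswana", "South Africa", "Madagascar"] 17 (by decide) (by norm_num) (by decide) (by decide)]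
  rw [cond_eq xs "Middle East & Central Asia" ["Turkey East", "Lebanon Syria", "Israel Jordan", "Iraq", "Iran West", "Iran East", "Saudi Arabia", "Yemen", "Oman UAE", "Afghanistan", "Pakistan", "Kazakhstan", "Uzbekistan", "Turkmenistan", "Kyrgyzstan"] 15 (by decide) (by norm_num) (by decide) (by decide)]
  rw [cond_eq xs "Asia" ["Russia West", "Russia Central", "Russia East", "Siberia", "Russia Far East", "India North", "India South", "India East", "Sri Lanka", "China North", "China Central", "China South", "China East", "Tibet", "Mongolia", "Manchuria", "Korea", "Japan North", "Japan South", "Taiwan", "Vietnam", "Thailand", "Myanmar", "Laos Cambodia", "Malaysia", "Philippines", "Indonesia West", "Indonesia East"] 28 (by decide) (by norm_num) (by decide) (by decide)]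
  rw [cond_eq xs "Oceania" ["Western Australia", "Northern Territory", "Queensland", "New South Wales", "Victoria", "South Australia", "New Zealand North", "New Zealand South", "Papua New Guinea", "Melanesia", "Polynesia"] 11 (by decide) (by norm_num) (by decide) (by decide)]
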